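-- pv_equiv track=rewrite | github.com/thealiens-dev/alien-draw-tool | draw.py | build_ranges
-- ===== SOURCE A (Python) =====
-- def build_ranges(participants_sorted: list[tuple[str, int]]) -> tuple[list[tuple[str, int, int]], int]:
--     rows_sorted: list[tuple[str, int, int]] = []
--     current = 1
--     for uname, tc in participants_sorted:
--         from_ticket = current
--         to_ticket = current + tc - 1
--         rows_sorted.append((uname, from_ticket, to_ticket))
--         current = to_ticket + 1
--     total_tickets = current - 1
--     return rows_sorted, total_tickets
-- ===== SOURCE B (Python) =====
-- def build_ranges(participants_sorted: list[tuple[str, int]]) -> tuple[list[tuple[str, int, int]], int]: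
--     # Recursion on the list: number the tail's ranges from 1, then shift them
--     # past the head's block; the total is the sum of head count and tail total.
--     if not participants_sorted:
--         return [], 0
--     (uname, tc), rest = participants_sorted[0], participants_sorted[1:]
--     tail_rows, tail_total = build_ranges(rest)
--     rows = [(uname, 1, tc)] + [(u, f + tc, t + tc) for u, f, t in tail_rows]
--     return rows, tc + tail_total
-- ===== Notes on version B (the rewrite author's own statement) =====
-- stated objective: alternative
-- what changed: Replaces A's single stateful running-counter loop with structural recursion: the tail is numbered independently from 1 and its finished rows are then shifted by the head's ticket count, building the output back-to-front with no counter and no prefix sums.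
import Mathlib
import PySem

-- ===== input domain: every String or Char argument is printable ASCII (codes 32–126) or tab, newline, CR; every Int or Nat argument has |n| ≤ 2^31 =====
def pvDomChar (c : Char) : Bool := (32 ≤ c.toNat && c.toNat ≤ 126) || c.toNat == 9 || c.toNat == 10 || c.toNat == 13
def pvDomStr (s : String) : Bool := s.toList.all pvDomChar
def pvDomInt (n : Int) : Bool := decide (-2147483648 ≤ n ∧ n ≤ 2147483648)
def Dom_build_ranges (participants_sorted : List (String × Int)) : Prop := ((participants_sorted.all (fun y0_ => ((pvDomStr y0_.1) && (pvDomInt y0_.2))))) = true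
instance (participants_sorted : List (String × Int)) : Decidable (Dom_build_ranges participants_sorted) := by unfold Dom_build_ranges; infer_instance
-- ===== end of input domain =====

-- B replaces A's running-counter loop by structural recursion that numbers the tail from 1 and shifts it (alternative decomposition; not faster).

-- ===== PORT A =====
-- the for-loop over (uname, tc) with state (rows_sorted, current), then total = current - 1
def build_ranges (participants_sorted : List (String × Int)) : (List (String × Int × Int)) × Int :=
  let r := participants_sorted.foldl
    (fun (st : List (String × Int × Int) × Int) p =>
      let uname := p.1
      let tc := p.2
      let from_ticket := st.2
      let to_ticket := st.2 + tc - 1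
      (st.1 ++ [(uname, from_ticket, to_ticket)], to_ticket + 1))
    ([], 1)
  (r.1, r.2 - 1)

-- ===== PORT B =====
-- recursion on the list: tail numbered from 1, then shifted by the head's count
def build_ranges_alt : List (String × Int) → (List (String × Int × Int)) × Int
  | [] => ([], 0)
  | p :: rest =>
    let uname := p.1
    let tc := p.2
    let r := build_ranges_alt rest
    ((uname, 1, tc) :: r.1.map (fun q => (q.1, q.2.1 + tc, q.2.2 + tc)), tc + r.2)

-- ===== PRECONDITION & SPEC =====
def Spec_build_ranges (participants_sorted : List (String × Int)) (out : (List (String × Int × Int)) × Int) : Prop := out = build_ranges_alt participants_sorted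
instance (participants_sorted : List (String × Int)) (out : (List (String × Int × Int)) × Int) : Decidable (Spec_build_ranges participants_sorted out) := by unfold Spec_build_ranges; infer_instance

-- ===== CLAIM (what is proved, stated in full; the proofs are below) =====
def Claim_equal_build_ranges : Prop := ∀ (participants_sorted : List (String × Int)), Dom_build_ranges participants_sorted → Spec_build_ranges participants_sorted (build_ranges participants_sorted)

-- ===== LEMMAS AND PROOFS =====

-- invariant of A's loop: starting at counter c with accumulated rows acc, the fold yields
-- acc ++ (B's rows shifted by c - 1), and the final counter is c + B's total
theorem build_ranges_fold_inv (ps : List (String × Int)) :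
    ∀ (acc : List (String × Int × Int)) (c : Int),
    ps.foldl
      (fun (st : List (String × Int × Int) × Int) p =>
        let uname := p.1
        let tc := p.2
        let from_ticket := st.2
        let to_ticket := st.2 + tc - 1
        (st.1 ++ [(uname, from_ticket, to_ticket)], to_ticket + 1))
      (acc, c)
    = (acc ++ (build_ranges_alt ps).1.map (fun q => (q.1, q.2.1 + (c - 1), q.2.2 + (c - 1))),
       c + (build_ranges_alt ps).2) := by
  induction ps with
  | nil => intro acc c; simp [build_ranges_alt]
  | cons hd tl ih =>
      intro acc c
      simp only [List.foldl_cons, build_ranges_alt, List.map_cons, List.map_map]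
      rw [ih]
      rw [Prod.mk.injEq]
      constructor
      · simp only [List.append_assoc, List.singleton_append]
        congr 1
        refine congrArg₂ List.cons ?_ ?_
        · rw [Prod.mk.injEq, Prod.mk.injEq]
          exact ⟨rfl, by ring, by ring⟩
        · apply List.map_congr_left
          intro q _
          simp only [Function.comp_apply]
          rw [Prod.mk.injEq, Prod.mk.injEq]
          exact ⟨rfl, by ring, by ring⟩
      · ring

-- ===== VERDICT (by name: the statement is the Claim_ definition above) =====
theorem build_ranges_spec : Claim_equal_build_ranges := by
  intro ps _
  unfold Spec_build_ranges build_ranges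
  simp only []
  rw [build_ranges_fold_inv ps [] 1]
  simp only [List.nil_append]
  rw [Prod.mk.injEq]
  constructor
  · conv_rhs => rw [show (build_ranges_alt ps).1 = (build_ranges_alt ps).1.map id from by simp]
    apply List.map_congr_left
    intro q _
    simp
  · ring
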